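-- pv_equiv track=rewrite | github.com/esalino/algorithms-python | search/product_line_min_time.py | search
-- ===== SOURCE A (Python) =====
-- import math
--
-- def search(machines, goal, left, right):
--     if right < left:
--         return -1
--
--     mid = math.floor((right - left) / 2) + left
--     count_of_produced = 0
--     left_count = 0
--     right_count = 0
--     # calc the number produced at mid, left of mid and right of mid
--     for machine in machines:
--         count_of_produced += math.floor(mid / machine)
--         left_count += math.floor((mid - 1) / machine)
--         right_count += math.floor((mid + 1) / machine)
--
--     # We have reached our goal without going past it
--     if count_of_produced == goal or (left_count < goal < count_of_produced):
--         return mid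
--
--     # Since we are not looking for an exact match check if first
--     # count to right has made the goal.
--     if count_of_produced < goal < right_count:
--         return mid + 1
--
--     # We have not found the goal so recurse next mid.
--     if count_of_produced > goal:
--         return search(machines, goal, left, mid - 1)
--     else:
--         return search(machines, goal, mid + 1, right)
-- ===== SOURCE B (Python) =====
-- def produced(machines, t):
--     """Total units produced by time t."""
--     return sum(t // m for m in machines)
--
--
-- def search(machines, goal, left, right):
--     while left <= right:
--         mid = (left + right) // 2
--         c = produced(machines, mid)
--         if c >= goal:
--             if c == goal or produced(machines, mid - 1) < goal:
--                 return mid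
--             right = mid - 1
--         else:
--             if produced(machines, mid + 1) > goal:
--                 return mid + 1
--             left = mid + 1
--     return -1
-- ===== Notes on version B (the rewrite author's own statement) =====
-- stated objective: simpler
-- what changed: Tail recursion becomes an iterative while-loop with mid=(left+right)//2; A's single three-accumulator pass over machines is replaced by a one-line produced(t) sum helper, and the four flat branches become a two-level decision tree on produced(mid) vs goal that evaluates the neighbour counts lazily (at most one extra pass per iteration instead of A's always-three).
import Mathlib
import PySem

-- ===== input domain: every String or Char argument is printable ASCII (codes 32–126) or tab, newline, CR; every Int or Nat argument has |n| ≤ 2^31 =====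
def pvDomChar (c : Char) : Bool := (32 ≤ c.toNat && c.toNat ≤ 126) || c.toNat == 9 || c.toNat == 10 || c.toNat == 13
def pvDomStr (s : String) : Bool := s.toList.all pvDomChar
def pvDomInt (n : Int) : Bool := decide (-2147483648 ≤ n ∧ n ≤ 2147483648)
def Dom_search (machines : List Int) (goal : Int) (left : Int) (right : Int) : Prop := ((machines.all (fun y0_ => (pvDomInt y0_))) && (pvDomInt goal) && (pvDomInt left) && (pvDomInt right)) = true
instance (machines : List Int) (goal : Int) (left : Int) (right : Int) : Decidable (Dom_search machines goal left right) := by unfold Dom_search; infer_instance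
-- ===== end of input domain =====

-- B replaces A's tail recursion by an iterative while-loop (Source B) with mid = (left+right)//2,
-- a one-line `produced(t)` sum helper instead of A's three-accumulator pass, and a two-level
-- decision tree on produced(mid) vs goal that evaluates neighbour counts lazily: simpler.
-- Both ports totalize the recursion/loop with a fuel counter = interval size (always sufficient).
-- Pre_search excludes exactly the inputs where the Python A raises ZeroDivisionError (0 ∈ machines and the loop body runs).


-- ===== PORT A =====
-- mid = math.floor((right - left) / 2) + left; on the domain (|ints| ≤ 2^31) Python's
-- math.floor(x / y) on these ints equals floor division exactly (float quotients of
-- ints below 2^53 never round across an integer), so it is ported as PySem.Int.floordiv.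
def pvMidA (left right : Int) : Int := PySem.Int.floordiv (right - left) 2 + left

-- the single for-loop of A: three running sums over machines
def pvCounts (machines : List Int) (mid : Int) : Int × Int × Int :=
  machines.foldl
    (fun s m =>
      (s.1 + PySem.Int.floordiv mid m,
       s.2.1 + PySem.Int.floordiv (mid - 1) m,
       s.2.2 + PySem.Int.floordiv (mid + 1) m))
    (0, 0, 0)

-- A's recursion, totalized with fuel; fuel = interval size always suffices (each call shrinks
-- the interval), and at fuel 0 the interval is empty so -1 is the Python value there too.
def searchGo (machines : List Int) (goal : Int) : Nat → Int → Int → Int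
  | 0, _, _ => -1
  | fuel + 1, left, right =>
    if right < left then -1
    else
      let mid := pvMidA left right
      let c := pvCounts machines mid
      if c.1 = goal ∨ (c.2.1 < goal ∧ goal < c.1) then mid
      else if c.1 < goal ∧ goal < c.2.2 then mid + 1
      else if c.1 > goal then searchGo machines goal fuel left (mid - 1)
      else searchGo machines goal fuel (mid + 1) right

def search (machines : List Int) (goal : Int) (left : Int) (right : Int) : Int :=
  searchGo machines goal (right - left + 1).toNat left right

-- ===== PORT B =====
-- Source B's helper: sum(t // m for m in machines)
def produced (machines : List Int) (t : Int) : Int :=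
  (machines.map (fun m => PySem.Int.floordiv t m)).sum

-- the while-loop of Source B, with (left, right) as the loop state, totalized with the same fuel
def altGo (machines : List Int) (goal : Int) : Nat → Int → Int → Int
  | 0, _, _ => -1
  | fuel + 1, left, right =>
    if left ≤ right then
      let mid := PySem.Int.floordiv (left + right) 2
      let c := produced machines mid
      if c ≥ goal then
        if c = goal ∨ produced machines (mid - 1) < goal then mid
        else altGo machines goal fuel left (mid - 1)
      else
        if produced machines (mid + 1) > goal then mid + 1
        else altGo machines goal fuel (mid + 1) right
    else -1

def search_alt (machines : List Int) (goal : Int) (left : Int) (right : Int) : Int :=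
  altGo machines goal (right - left + 1).toNat left right

-- ===== PRECONDITION & SPEC =====
-- Pre_search excludes exactly the inputs where Python A raises ZeroDivisionError:
-- a machine of 0 while the loop body runs (left ≤ right); B raises there too.
def Pre_search (machines : List Int) (goal : Int) (left : Int) (right : Int) : Prop :=
  right < left ∨ ∀ m ∈ machines, m ≠ 0
instance (machines : List Int) (goal : Int) (left : Int) (right : Int) : Decidable (Pre_search machines goal left right) := by unfold Pre_search; infer_instance

def pvWitness_search : List Int × Int × Int × Int := ([2, 3], 5, 1, 100)

def Spec_search (machines : List Int) (goal : Int) (left : Int) (right : Int) (out : Int) : Prop := out = search_alt machines goal left right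
instance (machines : List Int) (goal : Int) (left : Int) (right : Int) (out : Int) : Decidable (Spec_search machines goal left right out) := by unfold Spec_search; infer_instance

-- ===== CLAIM (what is proved, stated in full; the proofs are below) =====
def Claim_equal_search : Prop := ∀ (machines : List Int) (goal : Int) (left : Int) (right : Int), Dom_search machines goal left right → Pre_search machines goal left right → Spec_search machines goal left right (search machines goal left right)

-- ===== LEMMAS AND PROOFS =====

theorem pvMidA_bounds (left right : Int) (h : left ≤ right) :
    left ≤ pvMidA left right ∧ pvMidA left right ≤ right := by
  have h2 := PySem.Int.floordiv_two_mid_bounds (lo := 0) (hi := right - left) (by omega)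
  rw [zero_add] at h2
  unfold pvMidA
  omega

-- the two midpoint formulas agree
theorem pvMid_eq (left right : Int) :
    pvMidA left right = PySem.Int.floordiv (left + right) 2 := by
  unfold pvMidA
  rw [PySem.Int.floordiv_eq_ediv_of_pos (by norm_num),
      PySem.Int.floordiv_eq_ediv_of_pos (by norm_num)]
  omega

theorem produced_cons (h t : Int) (tl : List Int) :
    produced (h :: tl) t = PySem.Int.floordiv t h + produced tl t := by
  simp [produced]

theorem pvCounts_init (machines : List Int) (mid a b c : Int) :
    machines.foldl
      (fun s m =>
        (s.1 + PySem.Int.floordiv mid m,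
         s.2.1 + PySem.Int.floordiv (mid - 1) m,
         s.2.2 + PySem.Int.floordiv (mid + 1) m))
      (a, b, c)
      = (a + produced machines mid, b + produced machines (mid - 1),
         c + produced machines (mid + 1)) := by
  induction machines generalizing a b c with
  | nil => simp [produced]
  | cons h tl ih =>
      simp only [List.foldl_cons]
      rw [ih, produced_cons, produced_cons, produced_cons]
      simp only [Prod.mk.injEq]
      refine ⟨by ring, by ring, by ring⟩

-- A's triple-accumulator loop computes exactly B's three `produced` values
theorem pvCounts_eq (machines : List Int) (mid : Int) :
    pvCounts machines mid
      = (produced machines mid, produced machines (mid - 1), produced machines (mid + 1)) := by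
  unfold pvCounts
  rw [pvCounts_init]
  simp

-- fuel-indexed loops agree whenever both fuels cover the interval
theorem searchGo_eq_altGo (machines : List Int) (goal : Int) :
    ∀ (n m : Nat) (left right : Int),
      (right - left + 1).toNat ≤ n → (right - left + 1).toNat ≤ m →
      searchGo machines goal n left right = altGo machines goal m left right := by
  intro n
  induction n with
  | zero =>
      intro m left right hn hm
      have hlr : right < left := by omega
      cases m with
      | zero => rfl
      | succ m => simp [searchGo, altGo, not_le.mpr hlr]
  | succ n ih =>
      intro m left right hn hm
      by_cases hlr : right < left
      · cases m with
        | zero => simp [searchGo, altGo, hlr]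
        | succ m => simp [searchGo, altGo, hlr, not_le.mpr hlr]
      · have hle' : left ≤ right := by omega
        cases m with
        | zero => omega
        | succ m =>
          simp only [searchGo, altGo, if_neg hlr, if_pos hle']
          rw [pvMid_eq, pvCounts_eq]
          have hb := pvMidA_bounds left right hle'
          rw [pvMid_eq] at hb
          set mid := PySem.Int.floordiv (left + right) 2 with hmid
          set c := produced machines mid with hc
          set l := produced machines (mid - 1) with hl
          set r := produced machines (mid + 1) with hr
          by_cases h1 : c = goal ∨ (l < goal ∧ goal < c)
          · -- A returns mid; B: c ≥ goal and (c = goal ∨ l < goal)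
            have hge : c ≥ goal := by rcases h1 with h | ⟨_, h⟩ <;> omega
            have hB : c = goal ∨ l < goal := by rcases h1 with h | ⟨h, _⟩ <;> [left; right] <;> exact h
            simp [h1, hge, hB]
          · simp only [if_neg h1]
            by_cases h2 : c < goal ∧ goal < r
            · -- A returns mid + 1; B: ¬ c ≥ goal and r > goal
              have hng : ¬ c ≥ goal := by omega
              simp [h2, hng]
            · simp only [if_neg h2]
              by_cases h3 : c > goal
              · -- both recurse on the left half
                have hge : c ≥ goal := le_of_lt h3
                have hB : ¬ (c = goal ∨ l < goal) := by
                  rintro (h | h)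
                  · omega
                  · exact h1 (Or.inr ⟨h, h3⟩)
                simp only [if_pos h3, if_pos hge, if_neg hB]
                exact ih m left (mid - 1) (by omega) (by omega)
              · -- both recurse on the right half: c < goal (c = goal is in h1) and r ≤ goal
                have hlt : c < goal := by
                  rcases lt_or_ge c goal with h | h
                  · exact h
                  · rcases eq_or_lt_of_le h with h' | h'
                    · exact absurd (Or.inl h'.symm) h1
                    · exact absurd h' h3
                have hnge : ¬ c ≥ goal := by omega
                have hrg : ¬ r > goal := fun h => h2 ⟨hlt, h⟩
                simp only [if_neg h3, if_neg hnge, if_neg hrg]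
                exact ih m (mid + 1) right (by omega) (by omega)

-- ===== VERDICT (by name: the statement is the Claim_ definition above) =====
theorem search_spec : Claim_equal_search := by
  intro machines goal left right _ _
  unfold Spec_search search search_alt
  exact searchGo_eq_altGo machines goal _ _ left right le_rfl le_rfl
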